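-- pv_equiv track=rewrite | github.com/Mamlesh18/LeetCode | hackerank/Non-Divisible-subset.py | nondivisible
-- ===== SOURCE A (Python) =====
-- def nondivisible(n,k):
--     res = []
--     for i in range(len(n)):
--         for j in range(i+1,len(n)):
--             summing = n[i] + n[j]
--             if summing % k != 0:
--                 c = n[i]
--                 d = n[j]
--                 res.append(c)
--                 res.append(d)
--
--     visited = set(res)
--     return len(visited)
-- ===== SOURCE B (Python) =====
-- def nondivisible(n, k):
--     # Residue-frequency approach: a value v belongs to some pair (i, j) with
--     # (n[i] + n[j]) % k != 0 iff enough elements avoid the residue (-v) % k.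
--     if len(n) < 2:
--         return 0
--     cnt = {}
--     for x in n:
--         r = x % k
--         cnt[r] = cnt.get(r, 0) + 1
--     total = len(n)
--     out = 0
--     for v in dict.fromkeys(n):
--         need = 1 if (2 * v) % k == 0 else 2
--         if need <= total - cnt.get((-v) % k, 0):
--             out += 1
--     return out
-- ===== Notes on version B (the rewrite author's own statement) =====
-- stated objective: faster
-- what changed: A enumerates all O(n^2) index pairs and collects pair endpoints into a set; B builds a residue-frequency table mod k once and decides each distinct value's membership in O(1) from the count of elements avoiding the complementary residue.
import Mathlib
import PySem

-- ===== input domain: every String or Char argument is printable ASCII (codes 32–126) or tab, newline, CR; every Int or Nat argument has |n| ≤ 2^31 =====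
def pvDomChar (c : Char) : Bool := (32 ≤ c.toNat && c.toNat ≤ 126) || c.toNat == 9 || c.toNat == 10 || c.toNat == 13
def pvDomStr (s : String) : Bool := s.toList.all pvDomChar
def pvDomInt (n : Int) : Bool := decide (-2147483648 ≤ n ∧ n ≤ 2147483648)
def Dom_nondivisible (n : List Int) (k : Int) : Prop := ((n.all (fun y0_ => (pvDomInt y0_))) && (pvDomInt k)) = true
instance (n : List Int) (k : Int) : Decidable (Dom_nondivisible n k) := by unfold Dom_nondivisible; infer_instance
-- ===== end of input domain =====

-- B replaces A's quadratic scan over all index pairs by a residue-frequency table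
-- that decides each distinct value's membership in O(1) (objective: faster).

-- ===== PORT A =====
-- the list `res` built by A's nested loops (indices from range(len) are in range, so pyGetD's default is never used)
def nondivisibleRes (n : List Int) (k : Int) : List Int :=
  (PySem.List.pyRange 0 (n.length : Int) 1).foldl (fun res i =>
    (PySem.List.pyRange (i + 1) (n.length : Int) 1).foldl (fun res j =>
      let summing := PySem.List.pyGetD n i 0 + PySem.List.pyGetD n j 0
      if PySem.Int.mod summing k ≠ 0 then
        let c := PySem.List.pyGetD n i 0
        let d := PySem.List.pyGetD n j 0
        (res ++ [c]) ++ [d]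
      else res) res) []

def nondivisible (n : List Int) (k : Int) : Int :=
  let res := nondivisibleRes n k
  let visited := PySem.Set.ofList res
  PySem.Set.len visited

-- ===== PORT B =====
def nondivisible_alt (n : List Int) (k : Int) : Int :=
  if n.length < 2 then 0
  else
    let cnt := n.foldl (fun d x =>
      d.insert (PySem.Int.mod x k) (d.getD (PySem.Int.mod x k) 0 + 1)) PySem.Dict.empty
    let total : Int := (n.length : Int)
    (PySem.List.dedup n).foldl (fun out v =>
      let need : Int := if PySem.Int.mod (2 * v) k = 0 then 1 else 2
      if need ≤ total - cnt.getD (PySem.Int.mod (-v) k) 0 then out + 1 else out) 0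

-- ===== PRECONDITION & SPEC =====
-- Python A raises ZeroDivisionError iff k == 0 and n has at least two elements
-- (with fewer than two elements the pair loop never computes `% k`).
def Pre_nondivisible (n : List Int) (k : Int) : Prop := k ≠ 0 ∨ n.length ≤ 1
instance (n : List Int) (k : Int) : Decidable (Pre_nondivisible n k) := by
  unfold Pre_nondivisible; infer_instance

def pvWitness_nondivisible : List Int × Int := ([1, 2, 3, 2], 4)

def Spec_nondivisible (n : List Int) (k : Int) (out : Int) : Prop := out = nondivisible_alt n k
instance (n : List Int) (k : Int) (out : Int) : Decidable (Spec_nondivisible n k out) := by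
  unfold Spec_nondivisible; infer_instance

-- ===== CLAIM (what is proved, stated in full; the proofs are below) =====
def Claim_equal_nondivisible : Prop := ∀ (n : List Int) (k : Int), Dom_nondivisible n k → Pre_nondivisible n k → Spec_nondivisible n k (nondivisible n k)

-- ===== LEMMAS AND PROOFS =====

-- the pair condition for a fixed value v, as a Bool predicate on the other element
def pvPred (k v x : Int) : Bool := decide (PySem.Int.mod (v + x) k ≠ 0)

theorem pv_mod_eq_mod_iff {k : Int} (a b : Int) (hk : k ≠ 0) :
    PySem.Int.mod a k = PySem.Int.mod b k ↔ k ∣ (a - b) := by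
  rcases lt_or_gt_of_ne hk with hneg | hpos
  · have ha : PySem.Int.mod a k = -PySem.Int.mod (-a) (-k) := by
      rw [← PySem.Int.mod_neg_neg]; simp
    have hb : PySem.Int.mod b k = -PySem.Int.mod (-b) (-k) := by
      rw [← PySem.Int.mod_neg_neg]; simp
    rw [ha, hb, neg_inj, PySem.Int.mod_eq_emod_of_pos (by omega),
      PySem.Int.mod_eq_emod_of_pos (by omega),
      show (-a % -k = -b % -k) = Int.ModEq (-k) (-a) (-b) from rfl,
      Int.modEq_iff_dvd, neg_dvd, show -b - -a = a - b by ring]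
  · rw [PySem.Int.mod_eq_emod_of_pos hpos, PySem.Int.mod_eq_emod_of_pos hpos,
      show (a % k = b % k) = Int.ModEq k a b from rfl, Int.modEq_iff_dvd, dvd_sub_comm]

theorem pv_res_eq_flatMap (n : List Int) (k : Int) :
    nondivisibleRes n k = (PySem.List.pyRange 0 (n.length : Int) 1).flatMap (fun i =>
      (PySem.List.pyRange (i + 1) (n.length : Int) 1).flatMap (fun j =>
        if PySem.Int.mod (PySem.List.pyGetD n i 0 + PySem.List.pyGetD n j 0) k ≠ 0
        then [PySem.List.pyGetD n i 0, PySem.List.pyGetD n j 0] else [])) := by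
  unfold nondivisibleRes
  have hinner : ∀ (i : Int) (res : List Int),
      (PySem.List.pyRange (i + 1) (n.length : Int) 1).foldl (fun res j =>
        let summing := PySem.List.pyGetD n i 0 + PySem.List.pyGetD n j 0
        if PySem.Int.mod summing k ≠ 0 then
          (res ++ [PySem.List.pyGetD n i 0]) ++ [PySem.List.pyGetD n j 0]
        else res) res
      = res ++ (PySem.List.pyRange (i + 1) (n.length : Int) 1).flatMap (fun j =>
          if PySem.Int.mod (PySem.List.pyGetD n i 0 + PySem.List.pyGetD n j 0) k ≠ 0
          then [PySem.List.pyGetD n i 0, PySem.List.pyGetD n j 0] else []) := by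
    intro i res
    rw [PySem.List.foldl_congr_mem' _ _
      (fun res j => res ++ (if PySem.Int.mod (PySem.List.pyGetD n i 0 + PySem.List.pyGetD n j 0) k ≠ 0
          then [PySem.List.pyGetD n i 0, PySem.List.pyGetD n j 0] else [])) _ ?_,
      PySem.List.foldl_append_eq_flatMap]
    intro j _ acc
    by_cases h : PySem.Int.mod (PySem.List.pyGetD n i 0 + PySem.List.pyGetD n j 0) k ≠ 0 <;>
      simp [h]
  rw [PySem.List.foldl_congr_mem' _ _
    (fun res i => res ++ (PySem.List.pyRange (i + 1) (n.length : Int) 1).flatMap (fun j =>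
        if PySem.Int.mod (PySem.List.pyGetD n i 0 + PySem.List.pyGetD n j 0) k ≠ 0
        then [PySem.List.pyGetD n i 0, PySem.List.pyGetD n j 0] else [])) _ ?_,
    PySem.List.foldl_append_eq_flatMap, List.nil_append]
  intro i _ acc
  exact hinner i acc

theorem pv_mem_res_iff (n : List Int) (k v : Int) :
    v ∈ nondivisibleRes n k ↔ ∃ p q : ℕ, ∃ (hp : p < n.length) (hq : q < n.length),
      p ≠ q ∧ n[p]'hp = v ∧ pvPred k v (n[q]'hq) := by
  rw [pv_res_eq_flatMap]
  simp only [List.mem_flatMap, PySem.List.mem_pyRange_one]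
  constructor
  · rintro ⟨i, ⟨hi0, hilen⟩, j, ⟨hij, hjlen⟩, hv⟩
    have hj0 : (0:Int) ≤ j := by omega
    have hpi : i.toNat < n.length := by omega
    have hpj : j.toNat < n.length := by omega
    rw [PySem.List.pyGetD_eq_getElem n 0 hi0 hilen, PySem.List.pyGetD_eq_getElem n 0 hj0 hjlen] at hv
    have hne : i.toNat ≠ j.toNat := by omega
    by_cases hcond : PySem.Int.mod (n[i.toNat] + n[j.toNat]) k ≠ 0
    · rw [if_pos hcond] at hv
      simp only [List.mem_cons, List.not_mem_nil, or_false] at hv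
      rcases hv with hv | hv
      · exact ⟨i.toNat, j.toNat, hpi, hpj, hne, hv.symm, by
          simp only [pvPred, decide_eq_true_eq]; rw [hv]; exact hcond⟩
      · exact ⟨j.toNat, i.toNat, hpj, hpi, hne.symm, hv.symm, by
          simp only [pvPred, decide_eq_true_eq]; rw [hv, add_comm]; exact hcond⟩
    · rw [if_neg hcond] at hv; simp at hv
  · rintro ⟨p, q, hp, hq, hne, hpv, hq'⟩
    simp only [pvPred, decide_eq_true_eq] at hq'
    rcases Nat.lt_or_ge p q with hlt | hge
    · refine ⟨(p : Int), ⟨by omega, by omega⟩, (q : Int), ⟨by omega, by omega⟩, ?_⟩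
      rw [PySem.List.pyGetD_eq_getElem n 0 (by omega) (by omega),
        PySem.List.pyGetD_eq_getElem n 0 (by omega) (by omega)]
      simp only [Int.toNat_natCast]
      rw [if_pos (by rw [hpv]; exact hq')]
      simp [hpv]
    · have hlt : q < p := by omega
      refine ⟨(q : Int), ⟨by omega, by omega⟩, (p : Int), ⟨by omega, by omega⟩, ?_⟩
      rw [PySem.List.pyGetD_eq_getElem n 0 (by omega) (by omega),
        PySem.List.pyGetD_eq_getElem n 0 (by omega) (by omega)]
      simp only [Int.toNat_natCast]
      rw [if_pos (by rw [hpv, add_comm]; exact hq')]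
      simp [hpv]

theorem pv_two_le_countP_iff {α : Type} (P : α → Bool) (l : List α) :
    2 ≤ l.countP P ↔ ∃ p q : ℕ, ∃ (hp : p < l.length) (hq : q < l.length),
      p ≠ q ∧ P (l[p]'hp) ∧ P (l[q]'hq) := by
  induction l with
  | nil => simp
  | cons x t ih =>
    rw [List.countP_cons]
    by_cases hx : P x
    · rw [if_pos hx]
      constructor
      · intro h
        have h1 : 0 < t.countP P := by omega
        obtain ⟨a, ha, hPa⟩ := List.countP_pos_iff.mp h1
        obtain ⟨m, hm, hma⟩ := List.mem_iff_getElem.mp ha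
        refine ⟨0, m + 1, by simp, by simpa using Nat.succ_lt_succ hm, by omega, ?_, ?_⟩
        · simpa using hx
        · simpa [hma] using hPa
      · rintro ⟨p, q, hp, hq, hne, h1, h2⟩
        have : 0 < t.countP P := by
          rcases Nat.eq_zero_or_pos p with rfl | hp0
          · have hq0 : q ≠ 0 := fun h => hne h.symm
            obtain ⟨m, rfl⟩ := Nat.exists_eq_succ_of_ne_zero hq0
            refine List.countP_pos_iff.mpr ⟨t[m]'(by simpa using hq), List.getElem_mem _, ?_⟩
            simpa using h2
          · obtain ⟨m, rfl⟩ := Nat.exists_eq_succ_of_ne_zero (by omega : p ≠ 0)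
            refine List.countP_pos_iff.mpr ⟨t[m]'(by simpa using hp), List.getElem_mem _, ?_⟩
            simpa using h1
        omega
    · rw [if_neg hx, Nat.add_zero, ih]
      constructor
      · rintro ⟨p, q, hp, hq, hne, h1, h2⟩
        exact ⟨p + 1, q + 1, by simpa using Nat.succ_lt_succ hp, by simpa using Nat.succ_lt_succ hq,
          by omega, by simpa using h1, by simpa using h2⟩
      · rintro ⟨p, q, hp, hq, hne, h1, h2⟩
        have hp0 : p ≠ 0 := by rintro rfl; simp [hx] at h1
        have hq0 : q ≠ 0 := by rintro rfl; simp [hx] at h2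
        obtain ⟨a, rfl⟩ := Nat.exists_eq_succ_of_ne_zero hp0
        obtain ⟨b, rfl⟩ := Nat.exists_eq_succ_of_ne_zero hq0
        exact ⟨a, b, by simpa using hp, by simpa using hq, by omega,
          by simpa using h1, by simpa using h2⟩

theorem pv_exists_iff_count (l : List Int) (v : Int) (P : Int → Bool) :
    (∃ p q : ℕ, ∃ (hp : p < l.length) (hq : q < l.length),
      p ≠ q ∧ l[p]'hp = v ∧ P (l[q]'hq))
    ↔ v ∈ l ∧ (if P v then 2 else 1) ≤ l.countP P := by
  constructor
  · rintro ⟨p, q, hp, hq, hne, h1, h2⟩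
    refine ⟨h1 ▸ List.getElem_mem hp, ?_⟩
    by_cases hPv : P v
    · rw [if_pos hPv]
      exact (pv_two_le_countP_iff P l).mpr ⟨p, q, hp, hq, hne, by rw [h1]; exact hPv, h2⟩
    · rw [if_neg hPv]
      exact List.countP_pos_iff.mpr ⟨l[q]'hq, List.getElem_mem _, h2⟩
  · rintro ⟨hv, hcount⟩
    obtain ⟨p, hp, hpv⟩ := List.mem_iff_getElem.mp hv
    by_cases hPv : P v
    · rw [if_pos hPv] at hcount
      obtain ⟨a, b, ha, hb, hab, h1, h2⟩ := (pv_two_le_countP_iff P l).mp hcount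
      rcases Nat.decEq p a with _ | rfl
      · exact ⟨p, a, hp, ha, by assumption, hpv, h1⟩
      · exact ⟨p, b, hp, hb, by omega, hpv, h2⟩
    · rw [if_neg hPv] at hcount
      obtain ⟨u, hu, hPu⟩ := List.countP_pos_iff.mp hcount
      obtain ⟨q, hq, hqu⟩ := List.mem_iff_getElem.mp hu
      have hne : p ≠ q := by
        rintro rfl; rw [hpv] at hqu; rw [← hqu] at hPu; exact hPv hPu
      exact ⟨p, q, hp, hq, hne, hpv, by rw [hqu]; exact hPu⟩

theorem pv_cnt_getD (n : List Int) (k r : Int) :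
    (n.foldl (fun d x =>
      d.insert (PySem.Int.mod x k) (d.getD (PySem.Int.mod x k) 0 + 1)) PySem.Dict.empty).getD r 0
    = (n.countP (fun x => PySem.Int.mod x k == r) : Int) := by
  have h := PySem.Dict.getD_foldl_insert_add_one (n.map (fun x => PySem.Int.mod x k))
    (PySem.Dict.empty) r
  rw [List.foldl_map] at h
  rw [h, PySem.Dict.getD_empty, zero_add, List.count_eq_countP, List.countP_map]
  rfl

theorem pv_cond_iff (n : List Int) (k v : Int) (hk : k ≠ 0) :
    ((if PySem.Int.mod (2 * v) k = 0 then (1:Int) else 2) ≤ (n.length : Int)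
        - (n.foldl (fun d x =>
            d.insert (PySem.Int.mod x k) (d.getD (PySem.Int.mod x k) 0 + 1)) PySem.Dict.empty).getD
              (PySem.Int.mod (-v) k) 0)
    ↔ (if pvPred k v v then 2 else 1) ≤ n.countP (pvPred k v) := by
  rw [pv_cnt_getD]
  have hcongr : n.countP (fun x => PySem.Int.mod x k == PySem.Int.mod (-v) k)
      = n.countP (fun x => !(pvPred k v x)) := by
    apply List.countP_congr
    intro x _
    have : (PySem.Int.mod x k = PySem.Int.mod (-v) k) ↔ PySem.Int.mod (v + x) k = 0 := by
      rw [pv_mod_eq_mod_iff x (-v) hk, PySem.Int.mod_eq_zero_iff_dvd,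
        show x - -v = v + x by ring]
    simp only [pvPred, beq_iff_eq, Bool.not_eq_true', decide_eq_false_iff_not, not_not]
    exact this
  rw [hcongr]
  have hsplit : n.countP (pvPred k v) + n.countP (fun x => !(pvPred k v x)) = n.length := by
    have h1 := List.length_eq_countP_add_countP (l := n) (pvPred k v)
    have h2 : n.countP (fun a => decide ¬(pvPred k v a = true)) = n.countP (fun x => !(pvPred k v x)) := by
      apply List.countP_congr; intro x _; cases h : pvPred k v x <;> simp_all
    omega
  have hpv : (PySem.Int.mod (2 * v) k = 0) ↔ ¬ (pvPred k v v = true) := by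
    simp only [pvPred, decide_eq_true_eq, not_not, two_mul]
  by_cases h : pvPred k v v
  · rw [if_neg (by rw [hpv]; simp [h]), if_pos h]
    omega
  · rw [if_pos (hpv.mpr (by simp [h])), if_neg (by simp [h])]
    omega

theorem pv_nondivisible_eq (n : List Int) (k : Int) (hpre : Pre_nondivisible n k) :
    nondivisible n k = nondivisible_alt n k := by
  by_cases hlen : n.length < 2
  · have hres : nondivisibleRes n k = [] := by
      rw [List.eq_nil_iff_forall_not_mem]
      intro v hv
      obtain ⟨p, q, hp, hq, hne, -, -⟩ := (pv_mem_res_iff n k v).mp hv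
      omega
    have hB : nondivisible_alt n k = 0 := by unfold nondivisible_alt; rw [if_pos hlen]
    have hA : nondivisible n k = 0 := by simp [nondivisible, hres, PySem.Set.len]
    rw [hA, hB]
  · have hk : k ≠ 0 := by
      rcases hpre with h | h
      · exact h
      · omega
    simp only [nondivisible, nondivisible_alt, if_neg hlen]
    have hfold := PySem.List.foldl_ite_add_one
      (p := fun v : Int => (if PySem.Int.mod (2 * v) k = 0 then (1:Int) else 2) ≤ (n.length : Int)
        - (n.foldl (fun d x =>
            d.insert (PySem.Int.mod x k) (d.getD (PySem.Int.mod x k) 0 + 1)) PySem.Dict.empty).getD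
              (PySem.Int.mod (-v) k) 0)
      (PySem.List.dedup n) 0
    rw [hfold, zero_add]
    simp only [PySem.Set.len, PySem.List.dedup_eq_ofList]
    congr 1
    rw [List.countP_eq_length_filter]
    apply List.Perm.length_eq
    rw [List.perm_ext_iff_of_nodup (PySem.Set.nodup_ofList _)
      ((PySem.Set.nodup_ofList n).filter _)]
    intro v
    rw [PySem.Set.mem_ofList, pv_mem_res_iff, pv_exists_iff_count, List.mem_filter,
      PySem.Set.mem_ofList]
    constructor
    · rintro ⟨hv, hc⟩
      exact ⟨hv, decide_eq_true ((pv_cond_iff n k v hk).mpr hc)⟩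
    · rintro ⟨hv, hc⟩
      exact ⟨hv, (pv_cond_iff n k v hk).mp (of_decide_eq_true hc)⟩

-- ===== VERDICT (by name: the statement is the Claim_ definition above) =====
theorem nondivisible_spec : Claim_equal_nondivisible := by
  intro n k _ hpre
  unfold Spec_nondivisible
  exact pv_nondivisible_eq n k hpre
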